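-- pv_equiv track=rewrite | github.com/ClasesFilosIngen/evaluadores-America1096 | evaluacion.py | obtenerV
-- ===== SOURCE A (Python) =====
-- def obtenerV(datosEntrenamiento):
-- 	Voc, C, V = {}, {}, {}
-- 	j, k = 1, 0
-- 	ln = []
--
-- 	for datos in datosEntrenamiento:
-- 		[Voc.setdefault(x,0) for x in datos]
--
-- 	for datos in datosEntrenamiento:
-- 		cAux = []
-- 		for i in datos:
-- 			if i not in ln:
-- 				ln.append(i)
-- 				Voc[i] = j
-- 				j = j+1
--
-- 			cAux.append(Voc[i])
-- 		C.setdefault(k, cAux)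
-- 		k = k + 1
--
-- 	[V.setdefault(Voc[key],0) for key in Voc]
--
-- 	for datos in range(2):
-- 		for key in Voc:
-- 			V.update({Voc[key]:V.get(Voc[key])+datosEntrenamiento[datos].count(key)})
--
-- 	return (C, V, Voc)
-- ===== SOURCE B (Python) =====
-- def obtenerV(datosEntrenamiento):
-- 	Voc = {}
-- 	for datos in datosEntrenamiento:
-- 		for tok in datos:
-- 			if tok not in Voc:
-- 				Voc[tok] = len(Voc) + 1
-- 	C = {idx: [Voc[tok] for tok in datos] for idx, datos in enumerate(datosEntrenamiento)}
-- 	V = {v: 0 for v in Voc.values()}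
-- 	for datos in datosEntrenamiento[:2]:
-- 		for tok in datos:
-- 			V[Voc[tok]] += 1
-- 	return (C, V, Voc)
-- ===== Notes on version B (the rewrite author's own statement) =====
-- stated objective: faster
-- what changed: B builds the vocabulary in one conditional-insert pass (dropping A's zero-seeding pass and auxiliary ln list) and replaces A's per-vocabulary-key .count scans of the first two rows by a single accumulation sweep that increments V[Voc[tok]] for each token.
import Mathlib
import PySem

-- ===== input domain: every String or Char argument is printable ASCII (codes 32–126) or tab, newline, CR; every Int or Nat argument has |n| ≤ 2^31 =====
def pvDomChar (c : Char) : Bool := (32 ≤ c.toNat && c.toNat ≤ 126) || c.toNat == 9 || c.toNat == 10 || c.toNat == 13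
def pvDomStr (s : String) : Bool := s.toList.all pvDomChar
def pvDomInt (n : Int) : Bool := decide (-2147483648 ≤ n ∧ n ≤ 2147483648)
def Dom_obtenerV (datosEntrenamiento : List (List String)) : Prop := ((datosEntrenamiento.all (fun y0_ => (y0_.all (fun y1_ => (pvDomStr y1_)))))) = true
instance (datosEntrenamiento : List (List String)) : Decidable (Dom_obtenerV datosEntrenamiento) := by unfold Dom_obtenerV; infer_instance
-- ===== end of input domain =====

-- B replaces A's per-key `.count` frequency pass (a scan of the first two rows for every vocabulary
-- entry) by one accumulation sweep over those rows, and builds Voc in a single conditional-insert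
-- pass instead of A's seed-with-zeros pass plus a second renumbering pass with an auxiliary `ln`
-- list; objective: faster (removes the rows×vocab rescans).

-- ===== PORT A =====
def pass1A (L : List (List String)) : PySem.Dict String Int :=
  L.foldl (fun Voc datos => datos.foldl (fun Voc x => Voc.setdefault x 0) Voc) PySem.Dict.empty

-- one token of A's second pass: `if i not in ln: ln.append(i); Voc[i] = j; j = j+1` then `cAux.append(Voc[i])`
def stepA (st : PySem.Dict String Int × List Int × Int × List String) (i : String) :
    PySem.Dict String Int × List Int × Int × List String :=
  let (Voc, cAux, j, ln) := st
  let (Voc, j, ln) := if ln.contains i then (Voc, j, ln) else (Voc.insert i j, j + 1, ln ++ [i])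
  (Voc, cAux ++ [Voc.getD i 0], j, ln)

def innerA (st : PySem.Dict String Int × List Int × Int × List String) (datos : List String) :
    PySem.Dict String Int × List Int × Int × List String :=
  datos.foldl stepA st

def outerA (st : PySem.Dict String Int × PySem.Dict Int (List Int) × Int × Int × List String)
    (L : List (List String)) :
    PySem.Dict String Int × PySem.Dict Int (List Int) × Int × Int × List String :=
  L.foldl (fun st datos =>
    let (Voc, C, j, k, ln) := st
    let (Voc, cAux, j, ln) := innerA (Voc, [], j, ln) datos
    (Voc, C.setdefault k cAux, j, k + 1, ln)) st

-- (stepA/innerA/outerA are A's nested loops named so the lemmas below can speak about them)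

def obtenerV (datosEntrenamiento : List (List String)) :
    (List (Int × List Int)) × (List (Int × Int)) × (List (String × Int)) :=
  let Voc0 := pass1A datosEntrenamiento
  let s := outerA (Voc0, PySem.Dict.empty, 1, 0, []) datosEntrenamiento
  let Voc := s.1
  let C := s.2.1
  -- `[V.setdefault(Voc[key],0) for key in Voc]` — every key is present, so Voc[key] is getD
  let V0 : PySem.Dict Int Int :=
    Voc.keys.foldl (fun V key => V.setdefault (Voc.getD key 0) 0) PySem.Dict.empty
  -- `for datos in range(2): for key in Voc: V.update({Voc[key]: V.get(Voc[key]) + datosEntrenamiento[datos].count(key)})`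
  -- V.get(Voc[key]) is always present (seeded above) → getD; datosEntrenamiento[datos] is in
  -- range whenever the loop body runs under Pre_ (Voc nonempty forces length ≥ 2) → pyGetD
  let V := (PySem.List.pyRange 0 2 1).foldl (fun V datos =>
    Voc.keys.foldl (fun V key =>
      V.insert (Voc.getD key 0)
        (V.getD (Voc.getD key 0) 0 + (PySem.List.count (PySem.List.pyGetD datosEntrenamiento datos []) key : Int))) V) V0
  (C.items, V.items, Voc.items)

-- ===== PORT B =====
def obtenerV_alt (datosEntrenamiento : List (List String)) :
    (List (Int × List Int)) × (List (Int × Int)) × (List (String × Int)) :=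
  let Voc : PySem.Dict String Int :=
    datosEntrenamiento.foldl (fun Voc datos =>
      datos.foldl (fun Voc tok =>
        if Voc.contains tok then Voc else Voc.insert tok ((Voc.size : Int) + 1)) Voc) PySem.Dict.empty
  let C : PySem.Dict Int (List Int) :=
    (PySem.List.enumerate datosEntrenamiento 0).foldl
      (fun C p => C.insert p.1 (p.2.map (fun tok => Voc.getD tok 0))) PySem.Dict.empty
  let V0 : PySem.Dict Int Int := Voc.values.foldl (fun V v => V.insert v 0) PySem.Dict.empty
  -- `for datos in datosEntrenamiento[:2]: for tok in datos: V[Voc[tok]] += 1` — every key present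
  let V := (PySem.List.slice datosEntrenamiento none (some 2)).foldl
    (fun V datos => datos.foldl (fun V tok => V.modify (Voc.getD tok 0) 0 (· + 1)) V) V0
  (C.items, V.items, Voc.items)

-- ===== PRECONDITION & SPEC =====
-- Pre_ excludes exactly the inputs on which A raises IndexError: fewer than two training
-- sequences while some sequence is nonempty (A indexes datosEntrenamiento[0] and [1] whenever the
-- vocabulary is nonempty).
def Pre_obtenerV (datosEntrenamiento : List (List String)) : Prop :=
  2 ≤ datosEntrenamiento.length ∨ ∀ s ∈ datosEntrenamiento, s = []
instance (datosEntrenamiento : List (List String)) : Decidable (Pre_obtenerV datosEntrenamiento) := by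
  unfold Pre_obtenerV; infer_instance

def pvWitness_obtenerV : List (List String) := [["a", "b", "a"], ["b", "c"]]

def Spec_obtenerV (datosEntrenamiento : List (List String)) (out : (List (Int × List Int)) × (List (Int × Int)) × (List (String × Int))) : Prop := out = obtenerV_alt datosEntrenamiento
instance (datosEntrenamiento : List (List String)) (out : (List (Int × List Int)) × (List (Int × Int)) × (List (String × Int))) : Decidable (Spec_obtenerV datosEntrenamiento out) := by unfold Spec_obtenerV; infer_instance

-- ===== CLAIM (what is proved, stated in full; the proofs are below) =====
def Claim_equal_obtenerV : Prop := ∀ (datosEntrenamiento : List (List String)), Dom_obtenerV datosEntrenamiento → Pre_obtenerV datosEntrenamiento → Spec_obtenerV datosEntrenamiento (obtenerV datosEntrenamiento)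


-- ===== LEMMAS AND PROOFS =====

-- `canonV ks n` : the items list of a vocabulary dict mapping the i-th key of ks to n+i.
def canonV : List String → Nat → List (String × Int)
  | [], _ => []
  | t :: ts, n => (t, (n : Int)) :: canonV ts (n + 1)

-- rank of a token in the deduplicated vocabulary D
def rkOf (D : List String) (t : String) : Int := (D.idxOf t : Int) + 1

lemma canonV_append (ks : List String) (t : String) : ∀ n,
    canonV (ks ++ [t]) n = canonV ks n ++ [(t, ((n + ks.length : Nat) : Int))] := by
  induction ks with
  | nil => intro n; simp [canonV]
  | cons a as ih =>
      intro n; simp [canonV, ih (n + 1)]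
      omega

lemma map_fst_canonV (ks : List String) : ∀ n, (canonV ks n).map (·.1) = ks := by
  induction ks with
  | nil => intro n; simp [canonV]
  | cons a as ih => intro n; simp [canonV, ih]

lemma length_canonV (ks : List String) : ∀ n, (canonV ks n).length = ks.length := by
  induction ks with
  | nil => intro n; simp [canonV]
  | cons a as ih => intro n; simp [canonV, ih]

lemma getD_canonV (ks : List String) {t : String} (rest : List (String × Int)) :
    ∀ n, t ∈ ks →
      (PySem.Dict.mk (canonV ks n ++ rest)).getD t 0 = ((n : Int) + (ks.idxOf t : Int)) := by
  induction ks generalizing rest with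
  | nil => intro n ht; simp at ht
  | cons a as ih =>
      intro n ht
      rw [canonV]
      rw [PySem.Dict.getD_eq_get?_getD]
      rw [show ((a, (n : Int)) :: canonV as (n + 1) ++ rest) = ((a, (n : Int)) :: (canonV as (n + 1) ++ rest)) from rfl]
      rw [PySem.Dict.get?_mk_cons]
      by_cases h : a = t
      · subst h
        simp [List.idxOf_cons_self]
      · rw [if_neg (by simpa using h)]
        rw [← PySem.Dict.getD_eq_get?_getD]
        have ht' : t ∈ as := List.mem_of_ne_of_mem (fun he => h he.symm) ht
        rw [ih rest (n + 1) ht']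
        rw [List.idxOf_cons_ne _ (by simpa using h)]
        push_cast
        ring

lemma snd_canonV (D : List String) (h : D.Nodup) :
    (canonV D 1).map (·.2) = D.map (rkOf D) := by
  apply List.ext_getElem
  · simp [length_canonV]
  · intro i h1 h2
    have hi : i < D.length := by simpa using h2
    have hlen : ∀ n, (canonV D n).length = D.length := length_canonV D
    have hval : ∀ (E : List String) (n i : Nat) (hi : i < E.length),
        (canonV E n)[i]'(by rw [length_canonV]; exact hi) = (E[i], ((n + i : Nat) : Int)) := by
      intro E
      induction E with
      | nil => intro n i hi; simp at hi
      | cons a as ihE =>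
          intro n i hi
          match i with
          | 0 => simp [canonV]
          | Nat.succ m =>
              have hm : m < as.length := by simpa using hi
              simp only [canonV, List.getElem_cons_succ]
              rw [ihE (n + 1) m hm]
              simp
              omega
    have := hval D 1 i hi
    simp only [List.getElem_map]
    rw [this]
    simp [rkOf, List.Nodup.idxOf_getElem h i hi]
    omega

-- pass 1 of A: seeding with zeros produces the dedup list with value 0
lemma pass1_fold (ts : List String) : ∀ ks : List String,
    (ts.foldl (fun Voc x => Voc.setdefault x 0)
        (PySem.Dict.mk (ks.map (fun t => (t, (0 : Int)))))) =
      PySem.Dict.mk ((PySem.Set.update ks ts).map (fun t => (t, (0 : Int)))) := by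
  induction ts with
  | nil => intro ks; simp [PySem.Set.update_nil]
  | cons t ts ih =>
      intro ks
      rw [List.foldl_cons]
      by_cases ht : t ∈ ks
      · have hc : (PySem.Dict.mk (ks.map (fun t => (t, (0 : Int))))).contains t = true := by
          rw [PySem.Dict.contains_iff_mem_keys]
          simp [PySem.Dict.keys, ht]
        rw [PySem.Dict.setdefault_of_contains _ _ hc]
        rw [PySem.Set.update_cons, PySem.Set.add_of_mem ht]
        exact ih ks
      · have hc : (PySem.Dict.mk (ks.map (fun t => (t, (0 : Int))))).contains t = false := by
          rw [← Bool.not_eq_true, PySem.Dict.contains_iff_mem_keys]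
          simp [PySem.Dict.keys, ht]
        rw [PySem.Dict.setdefault_of_not_contains _ _ hc]
        have hins : (PySem.Dict.mk (ks.map (fun t => (t, (0 : Int))))).insert t 0 =
            PySem.Dict.mk ((ks ++ [t]).map (fun t => (t, (0 : Int)))) := by
          apply PySem.Dict.ext
          rw [PySem.Dict.items_insert_of_not_contains _ _ hc]
          simp
        rw [hins, PySem.Set.update_cons, PySem.Set.add_of_not_mem ht]
        exact ih (ks ++ [t])

lemma pass1A_eq (L : List (List String)) :
    pass1A L = PySem.Dict.mk ((PySem.Set.ofList L.flatten).map (fun t => (t, (0 : Int)))) := by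
  rw [pass1A, ← List.foldl_flatten]
  have h0 : (PySem.Dict.empty : PySem.Dict String Int) =
      PySem.Dict.mk (([] : List String).map (fun t => (t, (0 : Int)))) := rfl
  rw [h0, pass1_fold, PySem.Set.update_nil_left]

-- B's vocabulary pass
lemma vocB_fold (ts : List String) : ∀ ks : List String,
    (ts.foldl (fun Voc tok =>
        if Voc.contains tok then Voc else Voc.insert tok ((Voc.size : Int) + 1))
        (PySem.Dict.mk (canonV ks 1))) =
      PySem.Dict.mk (canonV (PySem.Set.update ks ts) 1) := by
  induction ts with
  | nil => intro ks; simp [PySem.Set.update_nil]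
  | cons t ts ih =>
      intro ks
      rw [List.foldl_cons]
      by_cases ht : t ∈ ks
      · have hc : (PySem.Dict.mk (canonV ks 1)).contains t = true := by
          rw [PySem.Dict.contains_iff_mem_keys]
          simp [PySem.Dict.keys, map_fst_canonV, ht]
        rw [if_pos hc, PySem.Set.update_cons, PySem.Set.add_of_mem ht]
        exact ih ks
      · have hc : (PySem.Dict.mk (canonV ks 1)).contains t = false := by
          rw [← Bool.not_eq_true, PySem.Dict.contains_iff_mem_keys]
          simp [PySem.Dict.keys, map_fst_canonV, ht]
        rw [if_neg (by simp [hc])]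
        have hins : (PySem.Dict.mk (canonV ks 1)).insert t
              (((PySem.Dict.mk (canonV ks 1)).size : Int) + 1) =
            PySem.Dict.mk (canonV (ks ++ [t]) 1) := by
          apply PySem.Dict.ext
          rw [PySem.Dict.items_insert_of_not_contains _ _ hc]
          rw [canonV_append]
          have hsz : (PySem.Dict.mk (canonV ks 1)).size = ks.length := by
            simp [PySem.Dict.size, length_canonV]
          rw [hsz]
          push_cast
          ring_nf
        rw [hins, PySem.Set.update_cons, PySem.Set.add_of_not_mem ht]
        exact ih (ks ++ [t])

-- looking up in a prefix of the vocabulary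
lemma idxOf_prefix {P ext : List String} {t : String} (ht : t ∈ P) :
    (P ++ ext).idxOf t = P.idxOf t := by
  rw [List.idxOf_append]
  simp [ht]

-- the in-place overwrite of the zero seeded for a newly ranked token
lemma insert_new (ln newF zs : List String) (i : String)
    (hmem : i ∉ ln) (hiF : i ∉ newF) (hiz : i ∉ zs) :
    (PySem.Dict.mk (canonV ln 1 ++
        ((i :: newF) ++ zs).map (fun t => (t, (0 : Int))))).insert i ((ln.length : Int) + 1) =
      PySem.Dict.mk (canonV (ln ++ [i]) 1 ++ (newF ++ zs).map (fun t => (t, (0 : Int)))) := by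
  apply PySem.Dict.ext
  have hcont : (PySem.Dict.mk (canonV ln 1 ++
      ((i :: newF) ++ zs).map (fun t => (t, (0 : Int))))).contains i = true := by
    rw [PySem.Dict.contains_iff_mem_keys]
    simp [PySem.Dict.keys]
  rw [PySem.Dict.items_insert_of_contains _ _ hcont]
  show List.map (fun p => if (p.1 == i) = true then (i, (ln.length : Int) + 1) else p)
      (canonV ln 1 ++ ((i :: newF) ++ zs).map (fun t => (t, (0 : Int)))) = _
  rw [List.map_append]
  have hpre : List.map (fun p => if (p.1 == i) = true then (i, (ln.length : Int) + 1) else p)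
      (canonV ln 1) = canonV ln 1 := by
    rw [List.map_congr_left (g := id), List.map_id]
    intro p hp
    have hfst : p.1 ∈ ln := by
      have := List.mem_map_of_mem (f := fun p => p.1) hp
      rwa [map_fst_canonV] at this
    have hne : p.1 ≠ i := fun he => hmem (he ▸ hfst)
    simp [hne]
  have htail : List.map ((fun p => if (p.1 == i) = true then (i, (ln.length : Int) + 1) else p) ∘
      (fun t => (t, (0 : Int)))) (newF ++ zs) = (newF ++ zs).map (fun t => (t, (0 : Int))) := by
    apply List.map_congr_left
    intro y hy
    have hne : y ≠ i := by
      intro he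
      subst he
      rcases List.mem_append.mp hy with h | h
      · exact hiF h
      · exact hiz h
    simp [Function.comp, hne]
  rw [show (i :: newF) ++ zs = i :: (newF ++ zs) from rfl, List.map_map, List.map_cons, htail, hpre]
  rw [canonV_append]
  push_cast
  simp [List.append_assoc]
  ring

lemma stepA_old (Voc : PySem.Dict String Int) (cAux : List Int) (j : Int) (ln : List String)
    (i : String) (h : i ∈ ln) :
    stepA (Voc, cAux, j, ln) i = (Voc, cAux ++ [Voc.getD i 0], j, ln) := by
  simp [stepA, h]

lemma stepA_new (Voc : PySem.Dict String Int) (cAux : List Int) (j : Int) (ln : List String)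
    (i : String) (h : i ∉ ln) :
    stepA (Voc, cAux, j, ln) i =
      (Voc.insert i j, cAux ++ [(Voc.insert i j).getD i 0], j + 1, ln ++ [i]) := by
  simp [stepA, h]

-- A's inner (per-row) loop
lemma innerA_spec (ts : List String) : ∀ (ln : List String) (cAux : List Int) (zs : List String),
    (PySem.Set.update ln ts ++ zs).Nodup →
    innerA (PySem.Dict.mk (canonV ln 1 ++
        (((PySem.Set.update ln ts).drop ln.length) ++ zs).map (fun t => (t, (0 : Int)))),
      cAux, (ln.length : Int) + 1, ln) ts =
    (PySem.Dict.mk (canonV (PySem.Set.update ln ts) 1 ++ zs.map (fun t => (t, (0 : Int)))),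
      cAux ++ ts.map (fun t => rkOf (PySem.Set.update ln ts) t),
      ((PySem.Set.update ln ts).length : Int) + 1, PySem.Set.update ln ts) := by
  induction ts with
  | nil =>
      intro ln cAux zs _
      simp [innerA, PySem.Set.update_nil, List.drop_length]
  | cons i ts ih =>
      intro ln cAux zs hnd
      rw [PySem.Set.update_cons] at hnd ⊢
      by_cases hmem : i ∈ ln
      · rw [PySem.Set.add_of_mem hmem] at hnd ⊢
        have hupd := PySem.Set.update_eq_append_filter ln ts
        have hdrop : (PySem.Set.update ln ts).drop ln.length =
            (PySem.Set.ofList ts).filter (fun y => !(PySem.Set.contains ln y)) := by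
          rw [hupd, List.drop_left]
        show innerA (stepA _ i) ts = _
        rw [stepA_old _ _ _ _ _ hmem]
        have hget : (PySem.Dict.mk (canonV ln 1 ++
            (((PySem.Set.update ln ts).drop ln.length) ++ zs).map (fun t => (t, (0 : Int))))).getD i 0 =
            rkOf (PySem.Set.update ln ts) i := by
          rw [getD_canonV ln _ 1 hmem]
          unfold rkOf
          rw [hupd, idxOf_prefix hmem]
          push_cast
          ring
        rw [hget, ih ln (cAux ++ [rkOf (PySem.Set.update ln ts) i]) zs hnd]
        simp
  -- new token: it is the next element of the deduplicated vocabulary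
      · rw [PySem.Set.add_of_not_mem hmem] at hnd ⊢
        have hupd := PySem.Set.update_eq_append_filter (ln ++ [i]) ts
        set newF := (PySem.Set.ofList ts).filter (fun y => !(PySem.Set.contains (ln ++ [i]) y)) with hnewF
        have hdrop : (PySem.Set.update (ln ++ [i]) ts).drop ln.length = i :: newF := by
          rw [hupd, List.append_assoc, List.drop_left]
          rfl
        have hdrop' : (PySem.Set.update (ln ++ [i]) ts).drop (ln ++ [i]).length = newF := by
          rw [hupd, List.drop_left]
        rw [hdrop]
        show innerA (stepA _ i) ts = _
        rw [stepA_new _ _ _ _ _ hmem]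
        have hnd2 : (((ln ++ [i]) ++ newF) ++ zs).Nodup := by
          rw [hupd] at hnd
          simpa [List.append_assoc] using hnd
        have hiF : i ∉ newF := by
          intro hin
          have hd := (List.nodup_append.mp ((List.nodup_append.mp hnd2).1)).2.2
          exact hd i (by simp) i hin rfl
        have hiz : i ∉ zs := by
          intro hin
          have hd := (List.nodup_append.mp hnd2).2.2
          exact hd i (by simp) i hin rfl
        have hins := insert_new ln newF zs i hmem hiF hiz
        rw [hins]
        have hget : (PySem.Dict.mk (canonV (ln ++ [i]) 1 ++
              (newF ++ zs).map (fun t => (t, (0 : Int))))).getD i 0 =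
            rkOf (PySem.Set.update (ln ++ [i]) ts) i := by
          have h1 : (ln ++ [i]).idxOf i = ln.length := by
            rw [List.idxOf_append]
            simp [hmem]
          rw [getD_canonV (ln ++ [i]) _ 1 (by simp)]
          unfold rkOf
          rw [hupd, idxOf_prefix (show i ∈ ln ++ [i] by simp), h1]
          push_cast
          ring
        rw [hget]
        have harg : (canonV (ln ++ [i]) 1 ++ (newF ++ zs).map (fun t => (t, (0 : Int)))) =
            (canonV (ln ++ [i]) 1 ++
              (((PySem.Set.update (ln ++ [i]) ts).drop (ln ++ [i]).length) ++ zs).map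
                (fun t => (t, (0 : Int)))) := by
          rw [hdrop']
        have hlen : (ln.length : Int) + 1 + 1 = (((ln ++ [i]).length : Nat) : Int) + 1 := by
          push_cast [List.length_append, List.length_singleton]; ring
        rw [harg, hlen, ih (ln ++ [i]) _ zs hnd]
        simp

-- A's outer loop
lemma outerA_spec (R : List (List String)) : ∀ (ln : List String) (C : PySem.Dict Int (List Int)) (k : Int),
    (PySem.Set.update ln R.flatten).Nodup →
    (∀ key ∈ C.keys, key < k) → C.keys.Nodup →
    outerA (PySem.Dict.mk (canonV ln 1 ++
        ((PySem.Set.update ln R.flatten).drop ln.length).map (fun t => (t, (0 : Int)))),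
      C, (ln.length : Int) + 1, k, ln) R =
    (PySem.Dict.mk (canonV (PySem.Set.update ln R.flatten) 1),
      PySem.Dict.mk (C.items ++ (PySem.List.enumerate R k).map
        (fun p => (p.1, p.2.map (fun t => rkOf (PySem.Set.update ln R.flatten) t)))),
      ((PySem.Set.update ln R.flatten).length : Int) + 1, k + R.length,
      PySem.Set.update ln R.flatten) := by
  induction R with
  | nil =>
      intro ln C k _ _ _
      simp [outerA, PySem.Set.update_nil, List.drop_length, PySem.List.enumerate]
  | cons datos R ih =>
      intro ln C k hnd hk hCnd
      rw [List.flatten_cons, PySem.Set.update_append] at hnd ⊢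
      set M := PySem.Set.update ln datos with hMdef
      set U := PySem.Set.update M R.flatten with hUdef
      obtain ⟨n1, hn1⟩ : ∃ n1, M = ln ++ n1 := ⟨_, PySem.Set.update_eq_append_filter ln datos⟩
      obtain ⟨n2, hn2⟩ : ∃ n2, U = M ++ n2 := ⟨_, PySem.Set.update_eq_append_filter M R.flatten⟩
      have hdropU : U.drop ln.length = (M.drop ln.length) ++ U.drop M.length := by
        rw [hn2, hn1]
        simp [List.append_assoc]
      have hMU : M ++ U.drop M.length = U := by
        rw [hn2, List.drop_left]
      have hndM : (M ++ U.drop M.length).Nodup := by rw [hMU]; exact hnd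
      have hinner := innerA_spec datos ln [] (U.drop M.length) hndM
      rw [hdropU]
      have houter : outerA (PySem.Dict.mk (canonV ln 1 ++
            ((M.drop ln.length) ++ U.drop M.length).map (fun t => (t, (0 : Int)))),
            C, (ln.length : Int) + 1, k, ln) (datos :: R) =
          outerA (PySem.Dict.mk (canonV M 1 ++ (U.drop M.length).map (fun t => (t, (0 : Int)))),
            C.setdefault k ([] ++ datos.map (fun t => rkOf M t)),
            (M.length : Int) + 1, k + 1, M) R := by
        show List.foldl _ _ (datos :: R) = List.foldl _ _ R
        rw [List.foldl_cons]
        congr 1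
        show (match innerA (PySem.Dict.mk (canonV ln 1 ++
            ((M.drop ln.length) ++ U.drop M.length).map (fun t => (t, (0 : Int)))),
            [], (ln.length : Int) + 1, ln) datos with
          | (Voc, cAux, j, ln) => (Voc, C.setdefault k cAux, j, k + 1, ln)) = _
        rw [hinner]
      rw [houter]
      have hkfresh : C.contains k = false := by
        rw [← Bool.not_eq_true, PySem.Dict.contains_iff_mem_keys]
        intro hin
        exact absurd (hk k hin) (by omega)
      have hCset : C.setdefault k ([] ++ datos.map (fun t => rkOf M t)) =
          PySem.Dict.mk (C.items ++ [(k, datos.map (fun t => rkOf M t))]) := by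
        rw [PySem.Dict.setdefault_of_not_contains _ _ hkfresh]
        apply PySem.Dict.ext
        rw [PySem.Dict.items_insert_of_not_contains _ _ hkfresh]
        simp
      rw [hCset]
      have hk' : ∀ key ∈ (PySem.Dict.mk (C.items ++ [(k, datos.map (fun t => rkOf M t))])).keys,
          key < k + 1 := by
        intro key hkey
        simp [PySem.Dict.keys] at hkey
        rcases hkey with h | h
        · have := hk key (by simpa [PySem.Dict.keys] using h)
          omega
        · omega
      have hCnd' : (PySem.Dict.mk (C.items ++ [(k, datos.map (fun t => rkOf M t))])).keys.Nodup := by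
        have hkeys : (PySem.Dict.mk (C.items ++ [(k, datos.map (fun t => rkOf M t))])).keys
            = C.keys ++ [k] := by
          simp [PySem.Dict.keys]
        rw [hkeys, List.nodup_append]
        refine ⟨hCnd, List.nodup_singleton _, ?_⟩
        intro a ha b hb
        have hb' : b = k := by simpa using hb
        subst hb'
        have := hk a ha
        omega
      rw [ih M (PySem.Dict.mk (C.items ++ [(k, datos.map (fun t => rkOf M t))])) (k + 1) hnd hk' hCnd']
      have hmapc : datos.map (fun t => rkOf M t) = datos.map (fun t => rkOf U t) := by
        apply List.map_congr_left
        intro t htd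
        have htM : t ∈ M := by
          rw [hMdef]
          exact (PySem.Set.mem_update _ _ _).mpr (Or.inr htd)
        unfold rkOf
        rw [hn2, idxOf_prefix htM]
      simp only [Prod.mk.injEq]
      refine ⟨rfl, ?_, rfl, ?_, rfl⟩
      · apply PySem.Dict.ext
        show (C.items ++ [(k, datos.map (fun t => rkOf M t))]) ++ _ = C.items ++ _
        rw [hmapc, List.append_assoc, PySem.List.enumerate_cons]
        simp
        exact fun a b _ t _ => by rw [← hUdef]
      · push_cast [List.length_cons]
        ring

-- generic: setdefault-fold over fresh distinct keys appends zeros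
lemma foldl_setdefault_fresh (ks : List String) (g : String → Int) :
    ∀ d : PySem.Dict Int Int, (ks.map g).Nodup → (∀ x ∈ ks, d.contains (g x) = false) →
    (ks.foldl (fun V x => V.setdefault (g x) 0) d) =
      PySem.Dict.mk (d.items ++ ks.map (fun x => (g x, (0 : Int)))) := by
  induction ks with
  | nil => intro d _ _; simp
  | cons x ks ih =>
      intro d hnd hfresh
      rw [List.foldl_cons]
      rw [PySem.Dict.setdefault_of_not_contains _ _ (hfresh x (by simp))]
      have hfresh' : ∀ y ∈ ks, (d.insert (g x) 0).contains (g y) = false := by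
        intro y hy
        rw [PySem.Dict.contains_insert]
        have hne : g y ≠ g x := by
          intro he
          have : g x ∈ ks.map g := he ▸ List.mem_map_of_mem hy
          exact (List.nodup_cons.mp hnd).1 this
        simp [hne, hfresh y (by simp [hy])]
      rw [ih (d.insert (g x) 0) (List.nodup_cons.mp hnd).2 hfresh']
      apply PySem.Dict.ext
      rw [PySem.Dict.items_insert_of_not_contains _ _ (hfresh x (by simp))]
      simp

-- generic: one frequency-update sweep of A's pass 4
lemma foldl_insert_add (ks : List String) (g f c : String → Int) :
    ∀ pre : List (Int × Int), (pre.map (·.1) ++ ks.map g).Nodup →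
    (ks.foldl (fun V x => V.insert (g x) (V.getD (g x) 0 + c x))
        (PySem.Dict.mk (pre ++ ks.map (fun x => (g x, f x))))) =
      PySem.Dict.mk (pre ++ ks.map (fun x => (g x, f x + c x))) := by
  induction ks with
  | nil => intro pre _; simp
  | cons x ks ih =>
      intro pre hnd
      have hnd' : ((pre ++ [(g x, f x + c x)]).map (·.1) ++ ks.map g).Nodup := by
        simpa [List.append_assoc] using hnd
      have hkeys : (PySem.Dict.mk (pre ++ (x :: ks).map (fun x => (g x, f x)))).keys.Nodup := by
        simpa [PySem.Dict.keys, Function.comp] using hnd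
      have hmem : (g x, f x) ∈ (PySem.Dict.mk (pre ++ (x :: ks).map (fun x => (g x, f x)))).items := by
        simp
      have hget : (PySem.Dict.mk (pre ++ (x :: ks).map (fun x => (g x, f x)))).getD (g x) 0 = f x :=
        PySem.Dict.getD_of_mem_items _ hmem hkeys 0
      have hcont : (PySem.Dict.mk (pre ++ (x :: ks).map (fun x => (g x, f x)))).contains (g x) = true := by
        rw [PySem.Dict.contains_iff_mem_keys]
        simp [PySem.Dict.keys]
      have hdisj := List.nodup_append.mp hnd
      have hxks : g x ∉ ks.map g := (List.nodup_cons.mp hdisj.2.1).1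
      rw [List.foldl_cons, hget]
      have hstep : (PySem.Dict.mk (pre ++ (x :: ks).map (fun x => (g x, f x)))).insert (g x) (f x + c x) =
          PySem.Dict.mk ((pre ++ [(g x, f x + c x)]) ++ ks.map (fun x => (g x, f x))) := by
        apply PySem.Dict.ext
        rw [PySem.Dict.items_insert_of_contains _ _ hcont]
        show List.map (fun p => if (p.1 == g x) = true then (g x, f x + c x) else p)
            (pre ++ (x :: ks).map (fun x => (g x, f x))) = _
        rw [List.map_append, List.map_map, List.map_cons]
        have hpre' : List.map (fun p => if (p.1 == g x) = true then (g x, f x + c x) else p) pre = pre := by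
          rw [List.map_congr_left (g := id), List.map_id]
          intro p hp
          have hne : p.1 ≠ g x := hdisj.2.2 p.1 (List.mem_map_of_mem hp) (g x) (by simp)
          simp [hne]
        have htail' : List.map ((fun p => if (p.1 == g x) = true then (g x, f x + c x) else p) ∘
            (fun x => (g x, f x))) ks = List.map (fun x => (g x, f x)) ks := by
          apply List.map_congr_left
          intro y hy
          have hne : g y ≠ g x := fun he => hxks (he ▸ List.mem_map_of_mem hy)
          simp [Function.comp, hne]
        rw [hpre', htail']
        simp
      rw [hstep, ih (pre ++ [(g x, f x + c x)]) hnd']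
      apply PySem.Dict.ext
      simp

lemma rank_nodup (D : List String) (h : D.Nodup) : (D.map (rkOf D)).Nodup := by
  refine h.map_on ?_
  intro x hx y hy hxy
  have hidx : D.idxOf x = D.idxOf y := by
    have := hxy
    unfold rkOf at this
    omega
  calc x = D[D.idxOf x]'(List.idxOf_lt_length_of_mem hx) := (List.getElem_idxOf _).symm
    _ = D[D.idxOf y]'(List.idxOf_lt_length_of_mem hy) := by congr 1
    _ = y := List.getElem_idxOf _

lemma getD_voc (ks : List String) {t : String} (ht : t ∈ ks) :
    (PySem.Dict.mk (canonV ks 1)).getD t 0 = rkOf ks t := by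
  have h := getD_canonV ks (rest := []) 1 ht
  rw [List.append_nil] at h
  rw [h]
  unfold rkOf
  ring

lemma rk_inj (D : List String) {x t : String} (hx : x ∈ D) (ht : t ∈ D)
    (h : rkOf D x = rkOf D t) : x = t := by
  have hidx : D.idxOf x = D.idxOf t := by unfold rkOf at h; omega
  calc x = D[D.idxOf x]'(List.idxOf_lt_length_of_mem hx) := (List.getElem_idxOf _).symm
    _ = D[D.idxOf t]'(List.idxOf_lt_length_of_mem ht) := by congr 1
    _ = t := List.getElem_idxOf _

lemma count_map_rk (D : List String) (l : List String)
    (hl : ∀ x ∈ l, x ∈ D) {t : String} (ht : t ∈ D) :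
    (l.map (rkOf D)).count (rkOf D t) = l.count t := by
  induction l with
  | nil => simp
  | cons x l ih =>
      have hx := hl x (by simp)
      have hbeq : (rkOf D x == rkOf D t) = (x == t) := by
        by_cases hxt : x = t
        · simp [hxt]
        · have : rkOf D x ≠ rkOf D t := fun he => hxt (rk_inj D hx ht he)
          simp [hxt, this]
      simp only [List.map_cons, List.count_cons, hbeq]
      rw [ih (fun y hy => hl y (by simp [hy]))]

-- the main two-row case
lemma main_case (r0 r1 : List String) (rest : List (List String)) :
    obtenerV (r0 :: r1 :: rest) = obtenerV_alt (r0 :: r1 :: rest) := by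
  set L := r0 :: r1 :: rest with hL
  set D := PySem.Set.ofList L.flatten with hD
  have hDnd : D.Nodup := PySem.Set.nodup_ofList _
  have hmemD : ∀ {t : String}, t ∈ L.flatten → t ∈ D := fun ht =>
    (PySem.Set.mem_ofList _ _).mpr ht
  have hr0D : ∀ x ∈ r0, x ∈ D := fun x hx => hmemD (List.mem_flatten.mpr ⟨r0, by simp [hL], hx⟩)
  have hr1D : ∀ x ∈ r1, x ∈ D := fun x hx => hmemD (List.mem_flatten.mpr ⟨r1, by simp [hL], hx⟩)
  -- the common vocabulary and its lookups
  have hrkNd : (D.map (rkOf D)).Nodup := rank_nodup D hDnd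
  -- ===== A side =====
  have hA2 : outerA (PySem.Dict.mk (D.map (fun t => (t, (0 : Int)))), PySem.Dict.empty, 1, 0, []) L =
      (PySem.Dict.mk (canonV D 1),
        PySem.Dict.mk ((PySem.List.enumerate L 0).map
          (fun p => (p.1, p.2.map (fun t => rkOf D t)))),
        (D.length : Int) + 1, (L.length : Int), D) := by
    have h := outerA_spec L [] PySem.Dict.empty 0
      (by rw [PySem.Set.update_nil_left]; exact hDnd) (by simp [PySem.Dict.keys, PySem.Dict.empty])
      (by simp [PySem.Dict.keys, PySem.Dict.empty])
    rw [PySem.Set.update_nil_left, ← hD] at h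
    simpa [canonV, PySem.Dict.empty] using h
  have hkeysVoc : (PySem.Dict.mk (canonV D 1)).keys = D := by
    simp [PySem.Dict.keys, map_fst_canonV]
  have hgetVoc : ∀ {t : String}, t ∈ D → (PySem.Dict.mk (canonV D 1)).getD t 0 = rkOf D t :=
    fun ht => getD_voc D ht
  -- A's V passes
  have hV0A : (PySem.Dict.mk (canonV D 1)).keys.foldl
      (fun V key => V.setdefault ((PySem.Dict.mk (canonV D 1)).getD key 0) 0) PySem.Dict.empty
      = PySem.Dict.mk (D.map (fun x => (rkOf D x, (0 : Int)))) := by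
    rw [hkeysVoc]
    rw [PySem.List.foldl_congr_mem D _ (fun V key => V.setdefault (rkOf D key) 0) _
      (fun acc x hx => by rw [hgetVoc hx])]
    rw [foldl_setdefault_fresh D (rkOf D) PySem.Dict.empty hrkNd
      (fun x _ => PySem.Dict.contains_empty _)]
    apply PySem.Dict.ext
    simp [PySem.Dict.empty]
  have hsweep : ∀ (row : List String) (f : String → Int),
      (PySem.Dict.mk (canonV D 1)).keys.foldl
        (fun V key => V.insert ((PySem.Dict.mk (canonV D 1)).getD key 0)
          (V.getD ((PySem.Dict.mk (canonV D 1)).getD key 0) 0 +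
            (PySem.List.count row key : Int)))
        (PySem.Dict.mk (D.map (fun x => (rkOf D x, f x))))
      = PySem.Dict.mk (D.map (fun x => (rkOf D x, f x + (PySem.List.count row x : Int)))) := by
    intro row f
    rw [hkeysVoc]
    rw [PySem.List.foldl_congr_mem D _
      (fun V key => V.insert (rkOf D key) (V.getD (rkOf D key) 0 + (PySem.List.count row key : Int))) _
      (fun acc x hx => by rw [hgetVoc hx])]
    have h := foldl_insert_add D (rkOf D) f (fun x => (PySem.List.count row x : Int)) []
      (by simpa using hrkNd)
    simpa using h
  have hpy0 : PySem.List.pyGetD L 0 [] = r0 := by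
    rw [hL]
    simp [PySem.List.pyGetD, PySem.List.pyGet?, PySem.List.pyIdx?]
    rw [if_pos (by positivity)]
    simp
  have hpy1 : PySem.List.pyGetD L 1 [] = r1 := by
    rw [hL]; simp [PySem.List.pyGetD, PySem.List.pyGet?, PySem.List.pyIdx?]
  -- B's vocabulary pass agrees with A's
  have hVocB : L.foldl (fun Voc datos => datos.foldl
      (fun Voc tok => if Voc.contains tok then Voc
        else Voc.insert tok ((Voc.size : Int) + 1)) Voc) PySem.Dict.empty
      = PySem.Dict.mk (canonV D 1) := by
    rw [← List.foldl_flatten]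
    rw [show (PySem.Dict.empty : PySem.Dict String Int) = PySem.Dict.mk (canonV [] 1) from rfl]
    rw [vocB_fold L.flatten [], PySem.Set.update_nil_left, ← hD]
  -- B's V0
  have hvals : (PySem.Dict.mk (canonV D 1)).values = D.map (rkOf D) := by
    show (canonV D 1).map (·.2) = _
    exact snd_canonV D hDnd
  have hV0B : (D.map (rkOf D)).foldl (fun V v => V.insert v 0) PySem.Dict.empty
      = PySem.Dict.mk (D.map (fun x => (rkOf D x, (0 : Int)))) := by
    apply PySem.Dict.ext
    rw [PySem.Dict.items_foldl_insert_fresh (D.map (rkOf D)) (fun a => a) (fun _ => (0 : Int))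
      PySem.Dict.empty (fun a _ => PySem.Dict.contains_empty _) (by simpa using hrkNd)]
    simp [PySem.Dict.empty]
  -- B's accumulation sweep
  have hkeysV0B : (PySem.Dict.mk (D.map (fun x => (rkOf D x, (0 : Int))))).keys = D.map (rkOf D) := by
    simp [PySem.Dict.keys]
  set W := (((r0 ++ r1).map (rkOf D)).foldl (fun V r => V.modify r 0 (· + 1))
    (PySem.Dict.mk (D.map (fun x => (rkOf D x, (0 : Int)))))) with hW
  have hkeysW : W.keys = D.map (rkOf D) := by
    rw [hW, PySem.Dict.keys_foldl_modify ((r0 ++ r1).map (rkOf D)) 0 (fun _ _ v => v + 1), hkeysV0B]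
    rw [PySem.Set.update_eq_append_filter]
    rw [List.filter_eq_nil_iff.mpr ?_, List.append_nil]
    intro a ha
    have ha' : a ∈ (r0 ++ r1).map (rkOf D) := (PySem.Set.mem_ofList _ _).mp ha
    obtain ⟨x, hx, rfl⟩ := List.mem_map.mp ha'
    have hxD : x ∈ D := by
      rcases List.mem_append.mp hx with h | h
      · exact hr0D x h
      · exact hr1D x h
    simp
    exact ⟨x, hxD, rfl⟩
  have hWnd : W.keys.Nodup := by rw [hkeysW]; exact hrkNd
  have hWgetD : ∀ {t : String}, t ∈ D →
      W.getD (rkOf D t) 0 = ((List.count t (r0 ++ r1) : Nat) : Int) := by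
    intro t ht
    rw [hW, PySem.Dict.getD_foldl_modify_add_one]
    have h0 : (PySem.Dict.mk (D.map (fun x => (rkOf D x, (0 : Int))))).getD (rkOf D t) 0 = 0 := by
      refine PySem.Dict.getD_of_mem_items _ ?_ (by rw [hkeysV0B]; exact hrkNd) 0
      exact List.mem_map_of_mem ht
    rw [h0, count_map_rk D (r0 ++ r1) (fun x hx => by
      rcases List.mem_append.mp hx with h | h
      · exact hr0D x h
      · exact hr1D x h) ht]
    simp
  have hWitems : W.items = D.map (fun t => (rkOf D t, ((List.count t (r0 ++ r1) : Nat) : Int))) := by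
    rw [PySem.Dict.items_eq_map_keys W hWnd 0, hkeysW, List.map_map]
    apply List.map_congr_left
    intro t ht
    simp only [Function.comp]
    rw [hWgetD ht]
  -- assemble both sides
  unfold obtenerV obtenerV_alt
  dsimp only
  rw [pass1A_eq, ← hD, hA2, hVocB]
  rw [hV0A]
  rw [show PySem.List.pyRange 0 2 1 = [0, 1] from rfl]
  rw [List.foldl_cons, List.foldl_cons, List.foldl_nil, hpy0, hpy1]
  rw [hsweep r0 (fun _ => (0 : Int)), hsweep r1 (fun x => (0 : Int) + (PySem.List.count r0 x : Int))]
  rw [show PySem.List.slice L none (some 2) = [r0, r1] from by rw [hL]; rfl]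
  rw [List.foldl_cons, List.foldl_cons, List.foldl_nil, ← List.foldl_append]
  rw [PySem.List.foldl_congr_mem (r0 ++ r1) _ (fun V tok => V.modify (rkOf D tok) 0 (· + 1)) _
    (fun acc x hx => by
      rw [hgetVoc (by
        rcases List.mem_append.mp hx with h | h
        · exact hr0D x h
        · exact hr1D x h)])]
  rw [hvals, hV0B,
    ← List.foldl_map (f := rkOf D) (g := fun (V : PySem.Dict Int Int) r => V.modify r 0 (· + 1))
      (l := r0 ++ r1), ← hW]
  dsimp only
  refine congrArg₂ Prod.mk ?_ (congrArg₂ Prod.mk ?_ rfl)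
  · rw [PySem.Dict.items_foldl_insert_fresh (PySem.List.enumerate L) (fun p => p.1)
        (fun p => p.2.map (fun tok => (PySem.Dict.mk (canonV D 1)).getD tok 0)) PySem.Dict.empty
        (fun a _ => PySem.Dict.contains_empty _)
        (by rw [PySem.List.map_fst_enumerate]; exact PySem.List.nodup_pyRange_one _ _)]
    show _ = [] ++ _
    rw [List.nil_append]
    apply List.map_congr_left
    intro p hp
    have hp2 : p.2 ∈ L := by
      have := List.mem_map_of_mem (f := fun x => x.2) hp
      rwa [PySem.List.map_snd_enumerate] at this
    refine congrArg _ ?_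
    apply List.map_congr_left
    intro t htok
    rw [hgetVoc (hmemD (List.mem_flatten.mpr ⟨p.2, hp2, htok⟩))]
  · rw [hWitems]
    apply List.map_congr_left
    intro t _
    refine congrArg _ ?_
    show ((0 : Int) + (List.count t r0 : Int)) + (List.count t r1 : Int) = _
    rw [List.count_append]
    push_cast
    ring

-- ===== VERDICT (by name: the statement is the Claim_ definition above) =====
theorem obtenerV_spec : Claim_equal_obtenerV := by
  intro L _hdom hpre
  unfold Spec_obtenerV
  rcases hpre with h2 | hemp
  · match L, h2 with
    | r0 :: r1 :: rest, _ => exact main_case r0 r1 rest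
  · match L with
    | [] => decide
    | [s] => rw [hemp s (by simp)]; decide
    | r0 :: r1 :: rest => exact main_case r0 r1 rest
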